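-- pv_equiv track=rewrite | github.com/GT-RAIL/circuitHTN | src/circuit_htn/prediction_node.py | frames_to_action_list
-- ===== SOURCE A (Python) =====
-- def frames_to_action_list(frames):
--     ''' Filter a list of per-frame classifications to a list of actions (note: filtering behavior is hardcoded
--     for the drill assembly task)
--
--     :param frames: per-frame classification (list of strings)
--     :return: list of actions
--     '''
--     actions = []
--     prev_action = 'none'
--     count = 0
--     actions_seen = []
--     for s in frames:
--         if s == prev_action and count < 300:
--             count += 1
--             if count == 6 and s != 'none':
--                 if s in actions_seen:
--                     s += '2'
--                 else:
--                     actions_seen.append(s)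
--                     s += '1'
--                 actions.append(s)
--         else:
--             count = 0
--             prev_action = s
--     return actions
-- ===== SOURCE B (Python) =====
-- def frames_to_action_list(frames):
--     ''' Filter a list of per-frame classifications to a list of actions (drill assembly task).
--
--     Two passes: first run-length encode the frame stream, then, per run, simulate the
--     resetting counter over the frames after the run's first frame.
--     '''
--     # Pass 1: run-length encode the frame stream
--     runs = []
--     cur, n = '', 0
--     for s in frames:
--         if n and s == cur:
--             n += 1
--         else:
--             if n:
--                 runs.append((cur, n))
--             cur, n = s, 1
--     if n:
--         runs.append((cur, n))
--     # Pass 2: per run, emit actions as the counter (which resets after 300) passes 6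
--     actions = []
--     seen = set()
--     for v, length in runs:
--         if v == 'none':
--             continue
--         c = 0
--         for _ in range(length - 1):
--             if c < 300:
--                 c += 1
--                 if c == 6:
--                     if v in seen:
--                         actions.append(v + '2')
--                     else:
--                         seen.add(v)
--                         actions.append(v + '1')
--             else:
--                 c = 0
--     return actions
-- ===== Notes on version B (the rewrite author's own statement) =====
-- stated objective: alternative
-- what changed: Replaces the single stateful frame-by-frame scan (prev_action/count bookkeeping) by a two-pass decomposition: run-length encode the frame stream first, then process each maximal run independently, simulating the resetting counter over the frames after the run's first frame and keeping emitted labels in a set.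
import Mathlib
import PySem

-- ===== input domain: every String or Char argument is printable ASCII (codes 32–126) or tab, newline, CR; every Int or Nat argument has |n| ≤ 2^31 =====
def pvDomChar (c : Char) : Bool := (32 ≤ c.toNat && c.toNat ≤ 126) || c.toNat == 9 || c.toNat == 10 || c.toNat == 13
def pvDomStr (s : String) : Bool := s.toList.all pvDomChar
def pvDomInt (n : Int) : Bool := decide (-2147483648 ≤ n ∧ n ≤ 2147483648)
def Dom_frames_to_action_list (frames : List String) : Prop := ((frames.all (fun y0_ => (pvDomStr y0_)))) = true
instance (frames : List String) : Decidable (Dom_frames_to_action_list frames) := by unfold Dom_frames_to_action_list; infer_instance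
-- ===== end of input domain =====

-- B replaces the single stateful per-frame scan by a two-pass decomposition (run-length
-- encode the frames, then process each run with a per-run reset counter); same O(n), lower constant.

-- ===== PORT A =====
-- state: (actions, prev_action, count, actions_seen)
def frames_to_action_list (frames : List String) : List String :=
  (frames.foldl (fun (st : List String × String × Int × List String) s =>
    if s = st.2.1 ∧ st.2.2.1 < 300 then
      if st.2.2.1 + 1 = 6 ∧ s ≠ "none" then
        if st.2.2.2.contains s then (st.1 ++ [s ++ "2"], st.2.1, st.2.2.1 + 1, st.2.2.2)
        else (st.1 ++ [s ++ "1"], st.2.1, st.2.2.1 + 1, st.2.2.2 ++ [s])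
      else (st.1, st.2.1, st.2.2.1 + 1, st.2.2.2)
    else (st.1, s, (0 : Int), st.2.2.2)) ([], "none", 0, [])).1

-- ===== PORT B =====
-- Source B's inner 'for _ in range(length-1)' loop over one run: counter c resets after 300,
-- an action is emitted each time c reaches 6; state is (actions, seen).
def emitRun (v : String) : Nat → Int → List String × PySem.Set String → List String × PySem.Set String
  | 0, _, st => st
  | Nat.succ k, c, st =>
    if c < 300 then
      if c + 1 = 6 then
        if PySem.Set.contains st.2 v then emitRun v k (c + 1) (st.1 ++ [v ++ "2"], st.2)
        else emitRun v k (c + 1) (st.1 ++ [v ++ "1"], PySem.Set.add st.2 v)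
      else emitRun v k (c + 1) st
    else emitRun v k 0 st

def frames_to_action_list_alt (frames : List String) : List String :=
  -- pass 1: run-length encode; state (runs, cur, n)
  let st := frames.foldl (fun (st : List (String × Nat) × String × Nat) s =>
      if st.2.2 ≠ 0 ∧ s = st.2.1 then (st.1, st.2.1, st.2.2 + 1)
      else ((if st.2.2 ≠ 0 then st.1 ++ [(st.2.1, st.2.2)] else st.1), s, 1))
    ([], "", 0)
  let runs := if st.2.2 ≠ 0 then st.1 ++ [(st.2.1, st.2.2)] else st.1
  -- pass 2: per run
  (runs.foldl (fun (st : List String × PySem.Set String) r =>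
      if r.1 = "none" then st else emitRun r.1 (r.2 - 1) 0 st)
    ([], PySem.Set.empty)).1

-- ===== PRECONDITION & SPEC =====
def Spec_frames_to_action_list (frames : List String) (out : List String) : Prop := out = frames_to_action_list_alt frames
instance (frames : List String) (out : List String) : Decidable (Spec_frames_to_action_list frames out) := by unfold Spec_frames_to_action_list; infer_instance

-- ===== CLAIM (what is proved, stated in full; the proofs are below) =====
def Claim_equal_frames_to_action_list : Prop := ∀ (frames : List String), Dom_frames_to_action_list frames → Spec_frames_to_action_list frames (frames_to_action_list frames)

-- ===== LEMMAS AND PROOFS =====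

-- A's loop body, under a name
def stepA (st : List String × String × Int × List String) (s : String) :
    List String × String × Int × List String :=
  if s = st.2.1 ∧ st.2.2.1 < 300 then
    if st.2.2.1 + 1 = 6 ∧ s ≠ "none" then
      if st.2.2.2.contains s then (st.1 ++ [s ++ "2"], st.2.1, st.2.2.1 + 1, st.2.2.2)
      else (st.1 ++ [s ++ "1"], st.2.1, st.2.2.1 + 1, st.2.2.2 ++ [s])
    else (st.1, st.2.1, st.2.2.1 + 1, st.2.2.2)
  else (st.1, s, (0 : Int), st.2.2.2)

theorem A_def (frames : List String) :
    frames_to_action_list frames = (frames.foldl stepA ([], "none", 0, [])).1 := rfl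

-- one A-step on a frame equal to prev_action, on the state (count, actions, seen)
def simA1 (v : String) (st : Int × List String × List String) : Int × List String × List String :=
  if st.1 < 300 then
    if st.1 + 1 = 6 ∧ v ≠ "none" then
      if st.2.2.contains v then (st.1 + 1, st.2.1 ++ [v ++ "2"], st.2.2)
      else (st.1 + 1, st.2.1 ++ [v ++ "1"], st.2.2 ++ [v])
    else (st.1 + 1, st.2.1, st.2.2)
  else (0, st.2.1, st.2.2)

def simA (v : String) : Nat → Int × List String × List String → Int × List String × List String
  | 0, st => st
  | Nat.succ k, st => simA v k (simA1 v st)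

theorem stepA_run (v : String) (st : Int × List String × List String) :
    stepA (st.2.1, v, st.1, st.2.2) v = ((simA1 v st).2.1, v, (simA1 v st).1, (simA1 v st).2.2) := by
  simp only [stepA, simA1, true_and]
  split_ifs <;> rfl

theorem A_repl (v : String) (k : Nat) : ∀ (st : Int × List String × List String) (rest : List String),
    List.foldl stepA (st.2.1, v, st.1, st.2.2) (List.replicate k v ++ rest) =
    List.foldl stepA ((simA v k st).2.1, v, (simA v k st).1, (simA v k st).2.2) rest := by
  induction k with
  | zero => intro st rest; simp [simA]
  | succ k ih =>
    intro st rest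
    rw [List.replicate_succ, List.cons_append, List.foldl_cons, stepA_run]
    exact ih (simA1 v st) rest

theorem simA_none (k : Nat) : ∀ st, (simA "none" k st).2 = st.2 := by
  induction k with
  | zero => intro st; rfl
  | succ k ih =>
    intro st
    show (simA "none" k (simA1 "none" st)).2 = st.2
    rw [ih]
    unfold simA1
    split_ifs <;> simp_all

theorem sim_emit (v : String) (hv : v ≠ "none") (k : Nat) :
    ∀ (c : Int) (a seen : List String),
    emitRun v k c (a, seen) = ((simA v k (c, a, seen)).2.1, (simA v k (c, a, seen)).2.2) := by
  induction k with
  | zero => intro c a seen; rfl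
  | succ k ih =>
    intro c a seen
    show (if c < 300 then
        if c + 1 = 6 then
          if PySem.Set.contains seen v then emitRun v k (c + 1) (a ++ [v ++ "2"], seen)
          else emitRun v k (c + 1) (a ++ [v ++ "1"], PySem.Set.add seen v)
        else emitRun v k (c + 1) (a, seen)
      else emitRun v k 0 (a, seen)) = _
    have hsucc : simA v (k + 1) (c, a, seen) = simA v k (simA1 v (c, a, seen)) := rfl
    rw [hsucc]
    by_cases hc : c < 300
    · by_cases h6 : c + 1 = 6
      · by_cases hm : seen.contains v = true
        · have hvm : v ∈ seen := by simpa using hm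
          have hs1 : simA1 v (c, a, seen) = (c + 1, a ++ [v ++ "2"], seen) := by
            simp [simA1, hc, h6, hv, hvm]
          rw [if_pos hc, if_pos h6, if_pos (show PySem.Set.contains seen v = true from hm), hs1]
          exact ih (c + 1) (a ++ [v ++ "2"]) seen
        · have hnm : v ∉ seen := by simpa using hm
          have hadd : PySem.Set.add seen v = seen ++ [v] := by
            simp [PySem.Set.add, hnm]
          have hs1 : simA1 v (c, a, seen) = (c + 1, a ++ [v ++ "1"], seen ++ [v]) := by
            simp [simA1, hc, h6, hv, hnm]
          rw [if_pos hc, if_pos h6, if_neg (show ¬ PySem.Set.contains seen v = true from hm),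
            hadd, hs1]
          exact ih (c + 1) (a ++ [v ++ "1"]) (seen ++ [v])
      · have hs1 : simA1 v (c, a, seen) = (c + 1, a, seen) := by
          simp [simA1, hc, h6]
        rw [if_pos hc, if_neg h6, hs1]
        exact ih (c + 1) a seen
    · have hs1 : simA1 v (c, a, seen) = (0, a, seen) := by
        simp [simA1, hc]
      rw [if_neg hc, hs1]
      exact ih 0 a seen

-- B pass 1 (run-length encoding) body, under a name
def stepR (st : List (String × Nat) × String × Nat) (s : String) :
    List (String × Nat) × String × Nat :=
  if st.2.2 ≠ 0 ∧ s = st.2.1 then (st.1, st.2.1, st.2.2 + 1)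
  else ((if st.2.2 ≠ 0 then st.1 ++ [(st.2.1, st.2.2)] else st.1), s, 1)

def rleOf (frames : List String) : List (String × Nat) :=
  let st := frames.foldl stepR ([], "", 0)
  if st.2.2 ≠ 0 then st.1 ++ [(st.2.1, st.2.2)] else st.1

-- B pass 2 body, under a name
def stepP (st : List String × PySem.Set String) (r : String × Nat) :
    List String × PySem.Set String :=
  if r.1 = "none" then st else emitRun r.1 (r.2 - 1) 0 st

theorem alt_def (frames : List String) :
    frames_to_action_list_alt frames = ((rleOf frames).foldl stepP ([], PySem.Set.empty)).1 := rfl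

theorem r_cont (v : String) (k : Nat) : ∀ (n : Nat), n ≠ 0 → ∀ (runs : List (String × Nat)) (rest : List String),
    List.foldl stepR (runs, v, n) (List.replicate k v ++ rest) =
    List.foldl stepR (runs, v, n + k) rest := by
  induction k with
  | zero => intro n _ runs rest; simp
  | succ k ih =>
    intro n hn runs rest
    rw [List.replicate_succ, List.cons_append, List.foldl_cons]
    rw [show stepR (runs, v, n) v = (runs, v, n + 1) by simp [stepR, hn]]
    rw [ih (n + 1) (Nat.succ_ne_zero n) runs rest]
    rw [show n + 1 + k = n + (k + 1) from by omega]

theorem r_acc : ∀ (frames : List String) (runs : List (String × Nat)) (cur : String) (n : Nat),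
    List.foldl stepR (runs, cur, n) frames =
    (runs ++ (List.foldl stepR ([], cur, n) frames).1, (List.foldl stepR ([], cur, n) frames).2) := by
  intro frames
  induction frames with
  | nil => intro runs cur n; simp
  | cons s t ih =>
    intro runs cur n
    rw [List.foldl_cons, List.foldl_cons]
    by_cases h : n ≠ 0 ∧ s = cur
    · rw [show stepR (runs, cur, n) s = (runs, cur, n + 1) by simp [stepR, h.1, h.2],
        show stepR (([] : List (String × Nat)), cur, n) s = ([], cur, n + 1) by simp [stepR, h.1, h.2]]
      exact ih runs cur (n + 1)
    · by_cases hn : n ≠ 0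
      · have hsc : ¬ s = cur := fun e => h ⟨hn, e⟩
        rw [show stepR (runs, cur, n) s = (runs ++ [(cur, n)], s, 1) by simp [stepR, hsc, hn],
          show stepR (([] : List (String × Nat)), cur, n) s = ([(cur, n)], s, 1) by simp [stepR, hsc, hn]]
        rw [ih (runs ++ [(cur, n)]) s 1, ih [(cur, n)] s 1]
        simp
      · rw [show stepR (runs, cur, n) s = (runs, s, 1) by simp [stepR, hn],
          show stepR (([] : List (String × Nat)), cur, n) s = ([], s, 1) by simp [stepR, hn]]
        exact ih runs s 1

theorem rle_cons (v : String) (k : Nat) (rest : List String)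
    (hrest : ∀ x, rest.head? = some x → x ≠ v) :
    rleOf (List.replicate (k + 1) v ++ rest) = (v, k + 1) :: rleOf rest := by
  unfold rleOf
  rw [List.replicate_succ, List.cons_append, List.foldl_cons]
  rw [show stepR (([] : List (String × Nat)), "", 0) v = ([], v, 1) by simp [stepR]]
  rw [r_cont v k 1 one_ne_zero [] rest]
  cases rest with
  | nil => simp [Nat.add_comm]
  | cons h t =>
    have hhv : h ≠ v := hrest h rfl
    rw [List.foldl_cons, List.foldl_cons]
    rw [show stepR (([] : List (String × Nat)), v, 1 + k) h = ([(v, 1 + k)], h, 1) by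
      simp [stepR, hhv]]
    rw [show stepR (([] : List (String × Nat)), "", 0) h = ([], h, 1) by simp [stepR]]
    rw [r_acc t [(v, 1 + k)] h 1]
    have hcomm : 1 + k = k + 1 := Nat.add_comm 1 k
    by_cases hz : (List.foldl stepR ([], h, 1) t).2.2 ≠ 0
    · simp [hz, hcomm]
    · simp [hz, hcomm]

-- the main run-by-run invariant: A's fold from a run boundary equals B's pass 2 over the runs
theorem BND : ∀ (N : Nat) (frames : List String), frames.length ≤ N →
    ∀ (a seen : List String) (prev : String) (c : Int),
    (∀ x, frames.head? = some x → (x ≠ prev ∨ x = "none")) →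
    (List.foldl stepA (a, prev, c, seen) frames).1 = ((rleOf frames).foldl stepP (a, seen)).1 ∧
    (List.foldl stepA (a, prev, c, seen) frames).2.2.2 = ((rleOf frames).foldl stepP (a, seen)).2 := by
  intro N
  induction N with
  | zero =>
    intro frames hlen a seen prev c _
    have : frames = [] := List.eq_nil_of_length_eq_zero (Nat.le_zero.mp hlen)
    subst this
    exact ⟨rfl, rfl⟩
  | succ N ih =>
    intro frames hlen a seen prev c hhd
    match frames with
    | [] => exact ⟨rfl, rfl⟩
    | h :: t =>
      have hdecomp : h :: t = List.replicate ((t.takeWhile (fun x => x == h)).length + 1) h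
          ++ t.dropWhile (fun x => x == h) := by
        rw [List.replicate_succ]
        rw [List.cons_append]
        congr 1
        have h1 : t.takeWhile (fun x => x == h) =
            List.replicate (t.takeWhile (fun x => x == h)).length h := by
          rw [List.eq_replicate_iff]
          refine ⟨rfl, fun b hb => ?_⟩
          have := List.mem_takeWhile_imp hb
          simpa using this
        conv_lhs => rw [← List.takeWhile_append_dropWhile (p := fun x => x == h) (l := t)]
        rw [← h1]
      set k := (t.takeWhile (fun x => x == h)).length with hk
      set rest := t.dropWhile (fun x => x == h) with hrestdef
      have hrest_head : ∀ x, rest.head? = some x → x ≠ h := by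
        intro x hx
        have hd := List.head?_dropWhile_not (fun x => x == h) t
        rw [← hrestdef] at hd
        rw [hx] at hd
        simpa using hd
      have hrlen : rest.length ≤ N := by
        have h1 : rest.length ≤ t.length := List.length_dropWhile_le _ _
        have h2 : t.length + 1 ≤ N + 1 := by simpa using hlen
        omega
      have hrest_hyp : ∀ x, rest.head? = some x → (x ≠ h ∨ x = "none") :=
        fun x hx => Or.inl (hrest_head x hx)
      rw [hdecomp, rle_cons h k rest hrest_head, List.foldl_cons]
      by_cases hp : h = prev
      · -- the run continues prev_action; possible only when h = "none" (first frames of input)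
        have hnone : h = "none" := by
          rcases hhd h rfl with hne | hn
          · exact absurd hp hne
          · exact hn
        subst hp
        rw [show ((a, h, c, seen) : List String × String × Int × List String)
            = ((c, a, seen).2.1, h, (c, a, seen).1, (c, a, seen).2.2) from rfl]
        rw [A_repl h (k + 1) (c, a, seen) rest]
        rw [show stepP (a, seen) (h, k + 1) = (a, seen) by simp [stepP, hnone]]
        have h2 : (simA h (k + 1) (c, a, seen)).2 = (a, seen) := by rw [hnone]; exact simA_none _ _
        have e1 : (simA h (k + 1) (c, a, seen)).2.1 = a := by rw [h2]
        have e2 : (simA h (k + 1) (c, a, seen)).2.2 = seen := by rw [h2]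
        rw [e1, e2]
        exact ih rest hrlen a seen h (simA h (k + 1) (c, a, seen)).1 hrest_hyp
      · -- run boundary: A resets (count := 0, prev_action := h)
        rw [List.replicate_succ, List.cons_append, List.foldl_cons]
        rw [show stepA (a, prev, c, seen) h = (a, h, 0, seen) by simp [stepA, hp]]
        rw [show ((a, h, (0 : Int), seen) : List String × String × Int × List String)
            = (((0 : Int), a, seen).2.1, h, ((0 : Int), a, seen).1, ((0 : Int), a, seen).2.2) from rfl]
        rw [A_repl h k ((0 : Int), a, seen) rest]
        by_cases hhn : h = "none"
        · rw [show stepP (a, seen) (h, k + 1) = (a, seen) by simp [stepP, hhn]]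
          have h2 : (simA h k ((0 : Int), a, seen)).2 = (a, seen) := by rw [hhn]; exact simA_none _ _
          have e1 : (simA h k ((0 : Int), a, seen)).2.1 = a := by rw [h2]
          have e2 : (simA h k ((0 : Int), a, seen)).2.2 = seen := by rw [h2]
          rw [e1, e2]
          exact ih rest hrlen a seen h (simA h k ((0 : Int), a, seen)).1 hrest_hyp
        · rw [show stepP (a, seen) (h, k + 1) = emitRun h k 0 (a, seen) by simp [stepP, hhn]]
          rw [sim_emit h hhn k 0 a seen]
          exact ih rest hrlen (simA h k ((0 : Int), a, seen)).2.1
            (simA h k ((0 : Int), a, seen)).2.2 h (simA h k ((0 : Int), a, seen)).1 hrest_hyp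

-- ===== VERDICT (by name: the statement is the Claim_ definition above) =====
theorem frames_to_action_list_spec : Claim_equal_frames_to_action_list := by
  intro frames _
  unfold Spec_frames_to_action_list
  rw [A_def, alt_def]
  refine (BND frames.length frames le_rfl [] [] "none" 0 ?_).1
  intro x _
  rcases eq_or_ne x "none" with hx | hx
  · exact Or.inr hx
  · exact Or.inl hx
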